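-- pv_equiv track=rewrite | github.com/laewonJeong/algorithmPractice | LeetCode/2478-longest-nice-subarray/longest-nice-subarray.py | longestNiceSubarray
-- ===== SOURCE A (Python) =====
-- from typing import List
--
-- def longestNiceSubarray(nums: List[int]) -> int:
--     answer = 1
--
--     for right in range(len(nums)):
--         now = nums[right]
--         left = right -1
--         while left >= 0 and now & nums[left] == 0:
--             now |= nums[left]
--             left -= 1
--
--         answer = max(answer, right - left)
--
--     return answer
-- ===== SOURCE B (Python) =====
-- from typing import List
--
-- def longestNiceSubarray(nums: List[int]) -> int:
--     answer = 1
--     used = 0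
--     left = 0
--     for right, x in enumerate(nums):
--         while used & x:
--             used ^= nums[left]
--             left += 1
--         used |= x
--         answer = max(answer, right - left + 1)
--     return answer
-- ===== Notes on version B (the rewrite author's own statement) =====
-- stated objective: alternative
-- what changed: Replaced the per-index backward rescan (for each right, walk left while bits stay disjoint) by a single two-pointer sliding window that keeps a running OR of the window's bits and evicts elements on the left with XOR, so each element enters and leaves the window at most once (O(n) worst case vs A's O(n^2) worst case; on the benchmark's input family A's rescans are short, so no measured speed-up).
import Mathlib
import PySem

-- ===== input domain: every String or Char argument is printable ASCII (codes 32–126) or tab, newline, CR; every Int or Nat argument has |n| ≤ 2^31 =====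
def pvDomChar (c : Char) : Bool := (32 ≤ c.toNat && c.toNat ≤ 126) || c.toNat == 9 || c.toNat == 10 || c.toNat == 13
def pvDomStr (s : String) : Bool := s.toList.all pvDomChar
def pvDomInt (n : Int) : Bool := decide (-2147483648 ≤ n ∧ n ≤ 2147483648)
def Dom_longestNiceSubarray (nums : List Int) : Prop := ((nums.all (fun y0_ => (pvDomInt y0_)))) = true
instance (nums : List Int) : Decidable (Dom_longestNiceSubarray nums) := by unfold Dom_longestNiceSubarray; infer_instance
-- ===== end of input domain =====

-- B replaces A's per-index backward rescan by a two-pointer sliding window with a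
-- running OR of the window's bits, each element entering/leaving the window at most
-- once (objective: alternative algorithm; no speed claim).

-- ===== PORT A =====
-- inner `while left >= 0 and now & nums[left] == 0: now |= nums[left]; left -= 1`
-- (the index is always in range when reached, so pyGetD's default is never used)
def pvAWhile (nums : List Int) (now : Int) (left : Int) : Int × Int :=
  if h : 0 ≤ left ∧ PySem.Int.band now (PySem.List.pyGetD nums left 0) = 0 then
    pvAWhile nums (PySem.Int.bor now (PySem.List.pyGetD nums left 0)) (left - 1)
  else (now, left)
termination_by (left + 1).toNat
decreasing_by omega

def longestNiceSubarray (nums : List Int) : Int :=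
  (PySem.List.pyRange 0 (PySem.List.len nums) 1).foldl
    (fun answer right =>
      let now := PySem.List.pyGetD nums right 0
      let p := pvAWhile nums now (right - 1)
      max answer (right - p.2)) 1

-- ===== PORT B =====
-- inner `while used & x: used ^= nums[left]; left += 1`; the loop runs at most
-- (window size) ≤ nums.length times (the window empties, making used = 0), so the
-- fuel nums.length is never exhausted on a real run.
def pvBWhile (nums : List Int) (x : Int) : Int → Int → Nat → Int × Int
  | used, left, 0 => (used, left)
  | used, left, fuel+1 =>
    if PySem.Int.band used x ≠ 0 then
      pvBWhile nums x (PySem.Int.bxor used (PySem.List.pyGetD nums left 0)) (left + 1) fuel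
    else (used, left)

def longestNiceSubarray_alt (nums : List Int) : Int :=
  ((PySem.List.enumerate nums 0).foldl
    (fun st p =>
      let ul := pvBWhile nums p.2 st.2.1 st.2.2 nums.length
      (max st.1 (p.1 - ul.2 + 1), PySem.Int.bor ul.1 p.2, ul.2))
    (1, 0, 0)).1

-- ===== PRECONDITION & SPEC =====
def Spec_longestNiceSubarray (nums : List Int) (out : Int) : Prop := out = longestNiceSubarray_alt nums
instance (nums : List Int) (out : Int) : Decidable (Spec_longestNiceSubarray nums out) := by unfold Spec_longestNiceSubarray; infer_instance

-- ===== CLAIM (what is proved, stated in full; the proofs are below) =====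
def Claim_equal_longestNiceSubarray : Prop := ∀ (nums : List Int), Dom_longestNiceSubarray nums → Spec_longestNiceSubarray nums (longestNiceSubarray nums)

-- ===== LEMMAS AND PROOFS =====

/- ## Bit-level toolkit: a two's-complement testBit view of PySem's band/bor/bxor -/

theorem pvNat_disj_add (a : Nat) : ∀ b : Nat, a &&& b = 0 → a + b = a ||| b := by
  induction a using Nat.strong_induction_on with
  | _ a ih =>
    intro b h
    rcases Nat.eq_zero_or_pos a with rfl | ha
    · simp
    · have h2 : a / 2 &&& b / 2 = 0 := by rw [← Nat.and_div_two, h]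
      have ih2 := ih (a / 2) (Nat.div_lt_self ha (by norm_num)) (b / 2) h2
      have ho : a ||| b = 2 * (a / 2 ||| b / 2) + (a ||| b) % 2 := by
        rw [← Nat.or_div_two]; omega
      have hm : ¬(a % 2 = 1 ∧ b % 2 = 1) := by
        intro hc
        have := Nat.and_mod_two_eq_one.mpr hc
        rw [h] at this; simp at this
      have hfull : (a ||| b) % 2 = 1 ↔ a % 2 = 1 ∨ b % 2 = 1 := Nat.or_mod_two_eq_one
      omega

theorem pvNat_sub_submask (t s : Nat) (h : s &&& t = s) : t - s = t ^^^ s := by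
  have hbit : ∀ i, s.testBit i = true → t.testBit i = true := by
    intro i hi
    have := congrArg (fun x => Nat.testBit x i) h
    simp only [Nat.testBit_and] at this
    cases ht : t.testBit i <;> simp [hi, ht] at this ⊢
  have hd : (t ^^^ s) &&& s = 0 := by
    apply Nat.eq_of_testBit_eq
    intro i
    simp only [Nat.testBit_and, Nat.testBit_xor, Nat.zero_testBit]
    cases hs : s.testBit i
    · simp
    · simp [hbit i hs]
  have hor : (t ^^^ s) ||| s = t := by
    apply Nat.eq_of_testBit_eq
    intro i
    simp only [Nat.testBit_or, Nat.testBit_xor]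
    cases hs : s.testBit i
    · simp
    · simp [hbit i hs]
  have := pvNat_disj_add (t ^^^ s) s hd
  omega

/-- Python's infinite-two's-complement bit `k` of an `Int`. -/
def pvTb (a : Int) (k : Nat) : Bool :=
  if 0 ≤ a then a.toNat.testBit k else !((-a - 1).toNat.testBit k)

theorem pvTb_zero (k : Nat) : pvTb 0 k = false := by simp [pvTb]

theorem pvTb_band (a b : Int) (k : Nat) :
    pvTb (PySem.Int.band a b) k = (pvTb a k && pvTb b k) := by
  rcases (by omega : 0 ≤ a ∨ a < 0) with ha | ha <;> rcases (by omega : 0 ≤ b ∨ b < 0) with hb | hb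
  · simp [PySem.Int.band, pvTb, ha, hb, Nat.testBit_and]
  · have hsub := pvNat_sub_submask a.toNat (a.toNat &&& (-b - 1).toNat)
      (by rw [Nat.and_right_comm, Nat.and_self])
    simp only [PySem.Int.band, pvTb, if_pos ha, if_neg (by omega : ¬(0:Int) ≤ b),
      if_pos (by positivity : (0:Int) ≤ ((a.toNat - (a.toNat &&& (-b-1).toNat) : Nat) : Int)),
      Int.toNat_natCast]
    rw [hsub]
    simp only [Nat.testBit_xor, Nat.testBit_and]
    cases a.toNat.testBit k <;> cases (-b - 1).toNat.testBit k <;> rfl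
  · have hsub := pvNat_sub_submask b.toNat (b.toNat &&& (-a - 1).toNat)
      (by rw [Nat.and_right_comm, Nat.and_self])
    simp only [PySem.Int.band, pvTb, if_pos hb, if_neg (by omega : ¬(0:Int) ≤ a),
      if_pos (by positivity : (0:Int) ≤ ((b.toNat - (b.toNat &&& (-a-1).toNat) : Nat) : Int)),
      Int.toNat_natCast]
    rw [hsub]
    simp only [Nat.testBit_xor, Nat.testBit_and]
    cases b.toNat.testBit k <;> cases (-a - 1).toNat.testBit k <;> rfl
  · have h1 : ¬(0:Int) ≤ a := by omega
    have h2 : ¬(0:Int) ≤ b := by omega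
    have h3 : ¬(0:Int) ≤ -((((-a - 1).toNat ||| (-b - 1).toNat : Nat)) : Int) - 1 := by
      have : (0:Int) ≤ ((((-a - 1).toNat ||| (-b - 1).toNat : Nat)) : Int) := by positivity
      omega
    simp only [PySem.Int.band, pvTb, if_neg h1, if_neg h2, if_neg h3]
    have h4 : -(-(((((-a - 1).toNat ||| (-b - 1).toNat : Nat)) : Int)) - 1) - 1
        = ((((-a - 1).toNat ||| (-b - 1).toNat : Nat)) : Int) := by ring
    rw [h4, Int.toNat_natCast]
    simp [Nat.testBit_or]

theorem pvTb_bor (a b : Int) (k : Nat) :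
    pvTb (PySem.Int.bor a b) k = (pvTb a k || pvTb b k) := by
  rcases (by omega : 0 ≤ a ∨ a < 0) with ha | ha <;> rcases (by omega : 0 ≤ b ∨ b < 0) with hb | hb
  · simp [PySem.Int.bor, pvTb, ha, hb, Nat.testBit_or]
  · have hsub := pvNat_sub_submask (-b - 1).toNat ((-b - 1).toNat &&& a.toNat)
      (by rw [Nat.and_right_comm, Nat.and_self])
    have h3 : ¬(0:Int) ≤ -(((((-b - 1).toNat - ((-b - 1).toNat &&& a.toNat) : Nat)) : Int)) - 1 := by
      have : (0:Int) ≤ (((((-b - 1).toNat - ((-b - 1).toNat &&& a.toNat) : Nat)) : Int)) := by positivity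
      omega
    simp only [PySem.Int.bor, pvTb, if_pos ha, if_neg (by omega : ¬(0:Int) ≤ b), if_neg h3]
    have h4 : -(-(((((-b - 1).toNat - ((-b - 1).toNat &&& a.toNat) : Nat)) : Int)) - 1) - 1
        = (((((-b - 1).toNat - ((-b - 1).toNat &&& a.toNat) : Nat)) : Int)) := by ring
    rw [h4, Int.toNat_natCast, hsub]
    simp only [Nat.testBit_xor, Nat.testBit_and]
    cases a.toNat.testBit k <;> cases (-b - 1).toNat.testBit k <;> rfl
  · have hsub := pvNat_sub_submask (-a - 1).toNat ((-a - 1).toNat &&& b.toNat)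
      (by rw [Nat.and_right_comm, Nat.and_self])
    have h3 : ¬(0:Int) ≤ -(((((-a - 1).toNat - ((-a - 1).toNat &&& b.toNat) : Nat)) : Int)) - 1 := by
      have : (0:Int) ≤ (((((-a - 1).toNat - ((-a - 1).toNat &&& b.toNat) : Nat)) : Int)) := by positivity
      omega
    simp only [PySem.Int.bor, pvTb, if_pos hb, if_neg (by omega : ¬(0:Int) ≤ a), if_neg h3]
    have h4 : -(-(((((-a - 1).toNat - ((-a - 1).toNat &&& b.toNat) : Nat)) : Int)) - 1) - 1
        = (((((-a - 1).toNat - ((-a - 1).toNat &&& b.toNat) : Nat)) : Int)) := by ring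
    rw [h4, Int.toNat_natCast, hsub]
    simp only [Nat.testBit_xor, Nat.testBit_and]
    cases b.toNat.testBit k <;> cases (-a - 1).toNat.testBit k <;> rfl
  · have h1 : ¬(0:Int) ≤ a := by omega
    have h2 : ¬(0:Int) ≤ b := by omega
    have h3 : ¬(0:Int) ≤ -((((-a - 1).toNat &&& (-b - 1).toNat : Nat)) : Int) - 1 := by
      have : (0:Int) ≤ ((((-a - 1).toNat &&& (-b - 1).toNat : Nat)) : Int) := by positivity
      omega
    simp only [PySem.Int.bor, pvTb, if_neg h1, if_neg h2, if_neg h3]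
    have h4 : -(-(((((-a - 1).toNat &&& (-b - 1).toNat : Nat)) : Int)) - 1) - 1
        = ((((-a - 1).toNat &&& (-b - 1).toNat : Nat)) : Int) := by ring
    rw [h4, Int.toNat_natCast]
    simp [Nat.testBit_and]

theorem pvTb_bxor (a b : Int) (k : Nat) :
    pvTb (PySem.Int.bxor a b) k = (pvTb a k ^^ pvTb b k) := by
  rcases (by omega : 0 ≤ a ∨ a < 0) with ha | ha <;> rcases (by omega : 0 ≤ b ∨ b < 0) with hb | hb
  · simp [PySem.Int.bxor, pvTb, ha, hb, Nat.testBit_xor]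
  · have h3 : ¬(0:Int) ≤ -(((a.toNat ^^^ (-b - 1).toNat : Nat)) : Int) - 1 := by
      have : (0:Int) ≤ (((a.toNat ^^^ (-b - 1).toNat : Nat)) : Int) := by positivity
      omega
    simp only [PySem.Int.bxor, pvTb, if_pos ha, if_neg (by omega : ¬(0:Int) ≤ b), if_neg h3]
    have h4 : -(-((((a.toNat ^^^ (-b - 1).toNat : Nat)) : Int)) - 1) - 1
        = (((a.toNat ^^^ (-b - 1).toNat : Nat)) : Int) := by ring
    rw [h4, Int.toNat_natCast]
    simp only [Nat.testBit_xor]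
    cases a.toNat.testBit k <;> cases (-b - 1).toNat.testBit k <;> rfl
  · have h3 : ¬(0:Int) ≤ -((((-a - 1).toNat ^^^ b.toNat : Nat)) : Int) - 1 := by
      have : (0:Int) ≤ ((((-a - 1).toNat ^^^ b.toNat : Nat)) : Int) := by positivity
      omega
    simp only [PySem.Int.bxor, pvTb, if_pos hb, if_neg (by omega : ¬(0:Int) ≤ a), if_neg h3]
    have h4 : -(-(((((-a - 1).toNat ^^^ b.toNat : Nat)) : Int)) - 1) - 1
        = ((((-a - 1).toNat ^^^ b.toNat : Nat)) : Int) := by ring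
    rw [h4, Int.toNat_natCast]
    simp only [Nat.testBit_xor]
    cases b.toNat.testBit k <;> cases (-a - 1).toNat.testBit k <;> rfl
  · have h1 : ¬(0:Int) ≤ a := by omega
    have h2 : ¬(0:Int) ≤ b := by omega
    simp only [PySem.Int.bxor, pvTb, if_neg h1, if_neg h2,
      if_pos (by positivity : (0:Int) ≤ (((-a - 1).toNat ^^^ (-b - 1).toNat : Nat) : Int)),
      Int.toNat_natCast]
    simp only [Nat.testBit_xor]
    cases (-a - 1).toNat.testBit k <;> cases (-b - 1).toNat.testBit k <;> rfl

theorem pvTb_ext (a b : Int) (h : ∀ k, pvTb a k = pvTb b k) : a = b := by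
  rcases (by omega : 0 ≤ a ∨ a < 0) with ha | ha <;> rcases (by omega : 0 ≤ b ∨ b < 0) with hb | hb
  · have : a.toNat = b.toNat := by
      apply Nat.eq_of_testBit_eq
      intro i
      have := h i
      simpa [pvTb, ha, hb] using this
    omega
  · exfalso
    have hk := h (a.toNat + (-b - 1).toNat)
    have h1 : a.toNat.testBit (a.toNat + (-b - 1).toNat) = false :=
      Nat.testBit_lt_two_pow (lt_of_lt_of_le Nat.lt_two_pow_self
        (Nat.pow_le_pow_right (by norm_num) (Nat.le_add_right _ _)))
    have h2 : (-b - 1).toNat.testBit (a.toNat + (-b - 1).toNat) = false :=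
      Nat.testBit_lt_two_pow (lt_of_lt_of_le Nat.lt_two_pow_self
        (Nat.pow_le_pow_right (by norm_num) (Nat.le_add_left _ _)))
    rw [pvTb, pvTb, if_pos ha, if_neg (by omega : ¬(0:Int) ≤ b), h1, h2] at hk
    simp at hk
  · exfalso
    have hk := h (b.toNat + (-a - 1).toNat)
    have h1 : b.toNat.testBit (b.toNat + (-a - 1).toNat) = false :=
      Nat.testBit_lt_two_pow (lt_of_lt_of_le Nat.lt_two_pow_self
        (Nat.pow_le_pow_right (by norm_num) (Nat.le_add_right _ _)))
    have h2 : (-a - 1).toNat.testBit (b.toNat + (-a - 1).toNat) = false :=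
      Nat.testBit_lt_two_pow (lt_of_lt_of_le Nat.lt_two_pow_self
        (Nat.pow_le_pow_right (by norm_num) (Nat.le_add_left _ _)))
    rw [pvTb, pvTb, if_neg (by omega : ¬(0:Int) ≤ a), if_pos hb, h1, h2] at hk
    simp at hk
  · have : (-a - 1).toNat = (-b - 1).toNat := by
      apply Nat.eq_of_testBit_eq
      intro i
      have := h i
      simp only [pvTb, if_neg (by omega : ¬(0:Int) ≤ a), if_neg (by omega : ¬(0:Int) ≤ b)] at this
      cases h1 : (-a - 1).toNat.testBit i <;> cases h2 : (-b - 1).toNat.testBit i <;>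
        rw [h1, h2] at this <;> simp_all
    omega

theorem pvBand_eq_zero_iff (a b : Int) :
    PySem.Int.band a b = 0 ↔ ∀ k, (pvTb a k && pvTb b k) = false := by
  constructor
  · intro h k
    rw [← pvTb_band, h, pvTb_zero]
  · intro h
    apply pvTb_ext
    intro k
    rw [pvTb_band, h, pvTb_zero]

theorem pvBand_bor_eq_zero (a b c : Int) :
    PySem.Int.band a (PySem.Int.bor b c) = 0 ↔
      PySem.Int.band a b = 0 ∧ PySem.Int.band a c = 0 := by
  simp only [pvBand_eq_zero_iff, pvTb_bor]
  constructor
  · intro h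
    constructor <;> intro k <;> have := h k <;>
      cases h1 : pvTb a k <;> cases h2 : pvTb b k <;> cases h3 : pvTb c k <;>
        simp [h1, h2, h3] at this ⊢
  · rintro ⟨h1, h2⟩ k
    have := h1 k; have := h2 k
    cases ha : pvTb a k <;> cases hb : pvTb b k <;> cases hc : pvTb c k <;>
      simp_all

theorem pvBxor_bor_cancel (a b : Int) (h : PySem.Int.band a b = 0) :
    PySem.Int.bxor (PySem.Int.bor a b) b = a := by
  rw [pvBand_eq_zero_iff] at h
  apply pvTb_ext
  intro k
  have := h k
  rw [pvTb_bxor, pvTb_bor]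
  cases ha : pvTb a k <;> cases hb : pvTb b k <;> simp_all

theorem pvBor_assoc (a b c : Int) :
    PySem.Int.bor (PySem.Int.bor a b) c = PySem.Int.bor a (PySem.Int.bor b c) := by
  apply pvTb_ext
  intro k
  simp [pvTb_bor, Bool.or_assoc]

/- ## Window layer -/

/-- OR of all elements of a list. -/
def pvOrL (l : List Int) : Int := l.foldr PySem.Int.bor 0

/-- All pairs of elements AND to 0 ("nice" subarray). -/
abbrev pvNice (l : List Int) : Prop := l.Pairwise (fun x y => PySem.Int.band x y = 0)

theorem pvBand_orL (x : Int) (l : List Int) :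
    PySem.Int.band x (pvOrL l) = 0 ↔ ∀ y ∈ l, PySem.Int.band x y = 0 := by
  induction l with
  | nil => simp [pvOrL, PySem.Int.band_zero]
  | cons y t ih =>
    simp only [pvOrL, List.foldr_cons, pvBand_bor_eq_zero, List.mem_cons] at *
    constructor
    · rintro ⟨h1, h2⟩ z hz
      rcases hz with rfl | hz
      · exact h1
      · exact ih.mp h2 z hz
    · intro h
      exact ⟨h y (Or.inl rfl), ih.mpr fun z hz => h z (Or.inr hz)⟩

theorem pvNice_cons (v : Int) (l : List Int) :
    pvNice (v :: l) ↔ PySem.Int.band v (pvOrL l) = 0 ∧ pvNice l := by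
  rw [pvBand_orL]
  exact List.pairwise_cons

/-- The window nums[l..r] (inclusive) as a list. -/
def pvWin (nums : List Int) (l r : Nat) : List Int := (nums.drop l).take (r + 1 - l)

theorem pvWin_single (nums : List Int) (r : Nat) (h : r < nums.length) :
    pvWin nums r r = [nums[r]] := by
  rw [pvWin]
  have h1 : r + 1 - r = 1 := by omega
  rw [h1, List.drop_eq_getElem_cons h, List.take_succ_cons, List.take_zero]

theorem pvWin_cons (nums : List Int) (l r : Nat) (hl : l ≤ r) (hlen : l < nums.length) :
    pvWin nums l r = nums[l] :: pvWin nums (l + 1) r := by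
  rw [pvWin, pvWin, List.drop_eq_getElem_cons hlen]
  have h1 : r + 1 - l = (r - l) + 1 := by omega
  have h2 : r + 1 - (l + 1) = r - l := by omega
  rw [h1, h2, List.take_succ_cons]

theorem pvWin_snoc (nums : List Int) (l r : Nat) (hl : l ≤ r + 1) (hr : r + 1 < nums.length) :
    pvWin nums l (r + 1) = pvWin nums l r ++ [nums[r + 1]] := by
  rw [pvWin, pvWin]
  have h1 : r + 1 + 1 - l = (r + 1 - l) + 1 := by omega
  rw [h1, List.take_succ]
  congr 1
  rw [List.getElem?_drop]
  have h2 : l + (r + 1 - l) = r + 1 := by omega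
  rw [h2, List.getElem?_eq_getElem hr]
  rfl

theorem pvNice_shrink (nums : List Int) (l l' r : Nat) (h : pvNice (pvWin nums l r))
    (hle : l ≤ l') : pvNice (pvWin nums l' r) := by
  have heq : pvWin nums l' r = (pvWin nums l r).drop (l' - l) := by
    rw [pvWin, pvWin, List.drop_take, List.drop_drop]
    have e1 : r + 1 - l - (l' - l) = r + 1 - l' := by omega
    rw [e1]
    have e2 : l + (l' - l) = l' := by omega
    rw [e2]
  rw [heq]
  exact h.sublist (List.drop_sublist _ _)

theorem pvNice_init (nums : List Int) (l r r' : Nat) (h : pvNice (pvWin nums l r'))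
    (hle : r ≤ r') : pvNice (pvWin nums l r) := by
  have heq : pvWin nums l r = (pvWin nums l r').take (r + 1 - l) := by
    rw [pvWin, pvWin, List.take_take]
    congr 1
    omega
  rw [heq]
  exact h.sublist (List.take_sublist _ _)

theorem pvNice_rr (nums : List Int) (r : Nat) : pvNice (pvWin nums r r) := by
  rw [pvWin]
  have h : r + 1 - r = 1 := by omega
  rw [h]
  cases nums.drop r <;> simp

/-- Minimal start `l` for which the window nums[l..r] is nice. -/
def pvS (nums : List Int) (r : Nat) : Nat :=
  Nat.find (⟨r, pvNice_rr nums r⟩ : ∃ l, pvNice (pvWin nums l r))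

theorem pvS_nice (nums : List Int) (r : Nat) : pvNice (pvWin nums (pvS nums r) r) :=
  Nat.find_spec (⟨r, pvNice_rr nums r⟩ : ∃ l, pvNice (pvWin nums l r))

theorem pvS_le (nums : List Int) (r : Nat) {l : Nat} (h : pvNice (pvWin nums l r)) :
    pvS nums r ≤ l :=
  Nat.find_min' (⟨r, pvNice_rr nums r⟩ : ∃ l, pvNice (pvWin nums l r)) h

theorem pvS_le_self (nums : List Int) (r : Nat) : pvS nums r ≤ r :=
  pvS_le nums r (pvNice_rr nums r)

theorem pvS_mono (nums : List Int) (r : Nat) : pvS nums r ≤ pvS nums (r + 1) :=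
  pvS_le nums r (pvNice_init nums _ r (r + 1) (pvS_nice nums (r + 1)) (by omega))

/-- OR of the window. -/
def pvOrW (nums : List Int) (l r : Nat) : Int := pvOrL (pvWin nums l r)

theorem pvOrW_single (nums : List Int) (r : Nat) (h : r < nums.length) :
    pvOrW nums r r = nums[r] := by
  rw [pvOrW, pvWin_single nums r h, pvOrL]
  simp [PySem.Int.bor_zero]

theorem pvOrW_cons (nums : List Int) (l r : Nat) (hl : l ≤ r) (hlen : l < nums.length) :
    pvOrW nums l r = PySem.Int.bor nums[l] (pvOrW nums (l + 1) r) := by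
  rw [pvOrW, pvWin_cons nums l r hl hlen]
  rfl

theorem pvOrL_snoc (u : List Int) (x : Int) :
    pvOrL (u ++ [x]) = PySem.Int.bor (pvOrL u) x := by
  induction u with
  | nil => simp [pvOrL, PySem.Int.bor_zero, PySem.Int.bor_comm]
  | cons y t ih =>
    simp only [pvOrL, List.cons_append, List.foldr_cons] at *
    rw [ih, ← pvBor_assoc]

theorem pvOrW_snoc (nums : List Int) (l r : Nat) (hl : l ≤ r + 1) (hr : r + 1 < nums.length) :
    pvOrW nums l (r + 1) = PySem.Int.bor (pvOrW nums l r) nums[r + 1] := by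
  rw [pvOrW, pvWin_snoc nums l r hl hr, pvOrL_snoc]
  rfl

/-- Appending x keeps the window nice iff the window's OR misses x. -/
theorem pvNice_snoc_iff (nums : List Int) (l r : Nat) (hl : l ≤ r + 1) (hr : r + 1 < nums.length)
    (hn : pvNice (pvWin nums l r)) :
    pvNice (pvWin nums l (r + 1)) ↔ PySem.Int.band (pvOrW nums l r) nums[r + 1] = 0 := by
  rw [pvWin_snoc nums l r hl hr]
  unfold pvNice
  rw [List.pairwise_append]
  constructor
  · rintro ⟨-, -, h⟩
    rw [PySem.Int.band_comm]
    unfold pvOrW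
    rw [pvBand_orL]
    intro y hy
    rw [PySem.Int.band_comm]
    exact h y hy _ (by simp)
  · intro h
    refine ⟨hn, by simp, ?_⟩
    intro y hy z hz
    rw [List.mem_singleton] at hz
    subst hz
    rw [PySem.Int.band_comm] at h
    unfold pvOrW at h
    rw [pvBand_orL] at h
    rw [PySem.Int.band_comm]
    exact h y hy

/- ## A's inner loop computes the minimal nice start -/

theorem pvAWhile_spec (nums : List Int) (r : Nat) (hr : r < nums.length) :
    ∀ l, l ≤ r → pvNice (pvWin nums l r) →
      pvAWhile nums (pvOrW nums l r) ((l : Int) - 1)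
        = (pvOrW nums (pvS nums r) r, (pvS nums r : Int) - 1) := by
  intro l
  induction l with
  | zero =>
    intro _ hn
    rw [pvAWhile, dif_neg (by omega)]
    have h0 : pvS nums r = 0 := Nat.le_zero.mp (pvS_le nums r hn)
    rw [h0]
  | succ l ih =>
    intro hl hn
    have hlen : l < nums.length := by omega
    have hc : ((l + 1 : Nat) : Int) - 1 = ((l : Nat) : Int) := by push_cast; ring
    rw [hc, pvAWhile]
    have hget : PySem.List.pyGetD nums ((l : Nat) : Int) 0 = nums[l] := by
      rw [PySem.List.pyGetD_natCast]
      exact List.getD_eq_getElem nums 0 hlen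
    rw [hget]
    by_cases hb : PySem.Int.band (pvOrW nums (l + 1) r) nums[l] = 0
    · rw [dif_pos ⟨by positivity, hb⟩]
      have hnow : PySem.Int.bor (pvOrW nums (l + 1) r) nums[l] = pvOrW nums l r := by
        rw [pvOrW_cons nums l r (by omega) hlen, PySem.Int.bor_comm]
      have hn' : pvNice (pvWin nums l r) := by
        rw [pvWin_cons nums l r (by omega) hlen, pvNice_cons]
        exact ⟨by rw [PySem.Int.band_comm]; exact hb, hn⟩
      rw [hnow]
      exact ih (by omega) hn'
    · rw [dif_neg (by intro hcon; exact hb hcon.2)]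
      have hs2 : pvS nums r = l + 1 := by
        rcases Nat.lt_or_ge (pvS nums r) (l + 1) with h | h
        · exfalso
          have hnl : pvNice (pvWin nums l r) :=
            pvNice_shrink nums (pvS nums r) l r (pvS_nice nums r) (by omega)
          rw [pvWin_cons nums l r (by omega) hlen, pvNice_cons] at hnl
          exact hb (by rw [PySem.Int.band_comm]; exact hnl.1)
        · exact Nat.le_antisymm (pvS_le nums r hn) h
      rw [hs2]
      norm_num

/- ## B's inner loop computes the minimal nice start for the next index -/

theorem pvBWhile_spec (nums : List Int) (r : Nat) (hr : r + 1 < nums.length) :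
    ∀ fuel l, pvS nums r ≤ l → l ≤ pvS nums (r + 1) → pvS nums (r + 1) - l ≤ fuel →
      pvBWhile nums nums[r + 1] (pvOrW nums l r) ((l : Nat) : Int) fuel
        = (pvOrW nums (pvS nums (r + 1)) r, ((pvS nums (r + 1) : Nat) : Int)) := by
  intro fuel
  induction fuel with
  | zero =>
    intro l h1 h2 h3
    have hl : l = pvS nums (r + 1) := by omega
    subst hl
    rfl
  | succ fuel ih =>
    intro l h1 h2 h3
    have hnl : pvNice (pvWin nums l r) :=
      pvNice_shrink nums (pvS nums r) l r (pvS_nice nums r) h1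
    by_cases hb : PySem.Int.band (pvOrW nums l r) nums[r + 1] = 0
    · -- the loop exits at once, and l is already minimal for r+1
      have hln : pvNice (pvWin nums l (r + 1)) := by
        rw [pvNice_snoc_iff nums l r (by have := pvS_le_self nums (r + 1); omega) hr hnl]
        exact hb
      have hl : l = pvS nums (r + 1) :=
        Nat.le_antisymm h2 (pvS_le nums (r + 1) hln)
      subst hl
      simp [pvBWhile, hb]
    · -- the window must shrink: evict nums[l]
      have hslt : l < pvS nums (r + 1) := by
        rcases Nat.lt_or_ge l (pvS nums (r + 1)) with h | h
        · exact h
        · exfalso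
          have hleq : l = pvS nums (r + 1) := by omega
          have hlr1 : l ≤ r + 1 := by rw [hleq]; exact pvS_le_self nums (r + 1)
          have hln : pvNice (pvWin nums l (r + 1)) := by
            rw [hleq]; exact pvS_nice nums (r + 1)
          rw [pvNice_snoc_iff nums l r hlr1 hr hnl] at hln
          exact hb hln
      have hlr : l ≤ r := by have := pvS_le_self nums (r + 1); omega
      have hlen : l < nums.length := by omega
      have hget : PySem.List.pyGetD nums ((l : Nat) : Int) 0 = nums[l] := by
        rw [PySem.List.pyGetD_natCast]
        exact List.getD_eq_getElem nums 0 hlen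
      have hnl' := hnl
      rw [pvWin_cons nums l r hlr hlen, pvNice_cons] at hnl'
      have hstep : PySem.Int.bxor (pvOrW nums l r) nums[l] = pvOrW nums (l + 1) r := by
        rw [pvOrW_cons nums l r hlr hlen, PySem.Int.bor_comm]
        exact pvBxor_bor_cancel _ _ (by rw [PySem.Int.band_comm]; exact hnl'.1)
      have hcast : ((l : Nat) : Int) + 1 = ((l + 1 : Nat) : Int) := by push_cast; ring
      rw [pvBWhile, if_pos hb, hget, hstep, hcast]
      exact ih (l + 1) (by omega) hslt (by omega)

/- ## Folding both outer loops to the same maximum -/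

def pvM (nums : List Int) (n : Nat) : Int :=
  (List.range n).foldl (fun ans (r : Nat) => max ans ((r : Int) - (pvS nums r : Int) + 1)) 1

theorem pvA_eq (nums : List Int) : longestNiceSubarray nums = pvM nums nums.length := by
  rw [longestNiceSubarray, PySem.List.len_eq, PySem.List.pyRange_zero_natCast, List.foldl_map,
    pvM]
  apply PySem.List.foldl_congr_mem
  intro ans r hrmem
  have hr : r < nums.length := List.mem_range.mp hrmem
  have hget : PySem.List.pyGetD nums ((r : Nat) : Int) 0 = nums[r] := by
    rw [PySem.List.pyGetD_natCast]
    exact List.getD_eq_getElem nums 0 hr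
  simp only [hget]
  rw [← pvOrW_single nums r hr,
    pvAWhile_spec nums r hr r (le_refl r) (pvNice_rr nums r)]
  have : (r : Int) - ((pvS nums r : Int) - 1) = (r : Int) - (pvS nums r : Int) + 1 := by ring
  rw [this]

theorem pvEnum_eq (nums : List Int) : ∀ s : Int, PySem.List.enumerate nums s
    = (List.range nums.length).map (fun (i : Nat) => (s + (i : Int), nums.getD i 0)) := by
  induction nums with
  | nil => intro s; simp [PySem.List.enumerate_nil]
  | cons x t ih =>
    intro s
    rw [PySem.List.enumerate_cons, ih (s + 1)]
    simp only [List.length_cons, List.range_succ_eq_map, List.map_cons, List.map_map]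
    congr 1
    · simp
    · apply List.map_congr_left
      intro i _
      simp only [Function.comp_apply, Nat.succ_eq_add_one, List.getD_cons_succ]
      congr 1
      push_cast; ring

theorem pvB_inv (nums : List Int) : ∀ r, r < nums.length →
    ((List.range (r + 1)).foldl
      (fun (st : Int × Int × Int) (i : Nat) =>
        let ul := pvBWhile nums (nums.getD i 0) st.2.1 st.2.2 nums.length
        (max st.1 (((i : Nat) : Int) - ul.2 + 1), PySem.Int.bor ul.1 (nums.getD i 0), ul.2))
      (1, 0, 0))
    = (pvM nums (r + 1), pvOrW nums (pvS nums r) r, ((pvS nums r : Nat) : Int)) := by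
  intro r
  induction r with
  | zero =>
    intro h0
    obtain ⟨k, hk⟩ : ∃ k, nums.length = k + 1 := ⟨nums.length - 1, by omega⟩
    have hget : nums.getD 0 0 = nums[0] := List.getD_eq_getElem nums 0 h0
    have hband : PySem.Int.band 0 nums[0] = 0 := by
      rw [PySem.Int.band_comm]; exact PySem.Int.band_zero _
    have hs0 : pvS nums 0 = 0 := Nat.le_zero.mp (pvS_le_self nums 0)
    have hb0 : pvBWhile nums nums[0] 0 0 nums.length = (0, 0) := by
      rw [hk]
      show pvBWhile nums nums[0] 0 0 (k + 1) = (0, 0)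
      simp only [pvBWhile]
      rw [if_neg (not_not.mpr hband)]
    have hM1 : pvM nums 1 = max 1 (((0 : Nat) : Int) - (pvS nums 0 : Int) + 1) := by
      rw [pvM, List.range_one, List.foldl_cons, List.foldl_nil]
    rw [List.range_one, List.foldl_cons, List.foldl_nil, hget]
    simp only [hb0, Prod.mk.injEq]
    refine ⟨by rw [hM1, hs0]; norm_num, ?_, by rw [hs0]; norm_num⟩
    rw [hs0, pvOrW_single nums 0 h0, PySem.Int.bor_comm]
    exact PySem.Int.bor_zero _
  | succ r ih =>
    intro hr1
    have hr : r < nums.length := by omega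
    rw [List.range_succ, List.foldl_append, ih hr]
    simp only [List.foldl_cons, List.foldl_nil]
    have hget : nums.getD (r + 1) 0 = nums[r + 1] := List.getD_eq_getElem nums 0 hr1
    have hwhile := pvBWhile_spec nums r hr1 nums.length (pvS nums r) (le_refl _)
      (pvS_mono nums r)
      (by have := pvS_le_self nums (r + 1); omega)
    simp only [hget, hwhile]
    have hused : PySem.Int.bor (pvOrW nums (pvS nums (r + 1)) r) nums[r + 1]
        = pvOrW nums (pvS nums (r + 1)) (r + 1) := by
      rw [pvOrW_snoc nums (pvS nums (r + 1)) r (pvS_le_self nums (r + 1)) hr1]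
    have hM : pvM nums (r + 2) = max (pvM nums (r + 1))
        (((r + 1 : Nat) : Int) - (pvS nums (r + 1) : Int) + 1) := by
      rw [pvM, pvM, show r + 2 = (r + 1) + 1 from rfl, List.range_succ, List.foldl_append,
        List.foldl_cons, List.foldl_nil]
    rw [hused, hM]

theorem pvB_eq (nums : List Int) :
    longestNiceSubarray_alt nums = pvM nums nums.length := by
  rw [longestNiceSubarray_alt, pvEnum_eq nums 0]
  rcases Nat.eq_zero_or_pos nums.length with h0 | hpos
  · rw [h0]
    simp [pvM]
  · obtain ⟨r, hrk⟩ : ∃ r, nums.length = r + 1 := ⟨nums.length - 1, by omega⟩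
    rw [List.foldl_map]
    have hcongr : ((List.range nums.length).foldl
        (fun (st : Int × Int × Int) (i : Nat) =>
          (fun st (p : Int × Int) =>
            let ul := pvBWhile nums p.2 st.2.1 st.2.2 nums.length
            (max st.1 (p.1 - ul.2 + 1), PySem.Int.bor ul.1 p.2, ul.2)) st
            ((0 : Int) + (i : Int), nums.getD i 0))
        (1, 0, 0))
        = ((List.range nums.length).foldl
        (fun (st : Int × Int × Int) (i : Nat) =>
          let ul := pvBWhile nums (nums.getD i 0) st.2.1 st.2.2 nums.length
          (max st.1 (((i : Nat) : Int) - ul.2 + 1), PySem.Int.bor ul.1 (nums.getD i 0), ul.2))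
        (1, 0, 0)) := by
      apply PySem.List.foldl_congr_mem
      intro acc i _
      simp
    rw [hcongr, show List.range nums.length = List.range (r + 1) from by rw [hrk],
      pvB_inv nums r (by omega), hrk]

-- ===== VERDICT (by name: the statement is the Claim_ definition above) =====
theorem longestNiceSubarray_spec : Claim_equal_longestNiceSubarray := by
  intro nums _
  show longestNiceSubarray nums = longestNiceSubarray_alt nums
  rw [pvA_eq, pvB_eq]
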